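-- pv_equiv track=rewrite | github.com/Edward-TL/VS_Buy-First-Steps | Scraper/Standard/corpus.py | create_corpus_points
-- ===== SOURCE A (Python) =====
-- def create_corpus_points(user_request, page_names, header):
--     corpus = {}
-- #     pattern = r'''(?x)                  # Flag para iniciar el modo verbose
-- #               (?:[A-Z]\.)+            # Hace match con abreviaciones como U.S.A.
-- #               | \w+(?:-\w+)*         # Hace match con palabras que pueden tener un gui贸n interno
-- #               | \$?\d+(?:\.\d+)?%?  # Hace match con dinero o porcentajes como $15.5 o 100%
-- #               | \.\.\.              # Hace match con puntos suspensivos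
-- #               | [][.,;"'?():-_`]    # Hace match con signos de puntuaci贸n
-- # '''
--     for names_array in page_names:
--         points = len(names_array)
--         for product in names_array:
--             if product != None:
--                 # words = nltk.regexp_tokenize(product, pattern)
--                 product = product.lower()
--                 words = product.split()
--
--                 for word in words:
--                     word = word.lower()
--                     if word in corpus:
--                         last_points = corpus[word]
--                         total_points = last_points + points
--                         corpus[word] = total_points
--                     else:
--                         corpus[word] = points
--                 points -= 1
--
--     return corpus
-- ===== SOURCE B (Python) =====
-- def create_corpus_points(user_request, page_names, header):
--     # Stage 1: flatten everything into one chronological list of (word, weight) events.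
--     events = []
--     for names_array in page_names:
--         scored = 0
--         for product in names_array:
--             if product is not None:
--                 weight = len(names_array) - scored
--                 events.extend((word, weight) for word in product.lower().split())
--                 scored += 1
--     # Stage 2: pre-seed the corpus with every word, in first-occurrence order.
--     corpus = dict.fromkeys((word for word, _ in events), 0)
--     # Stage 3: one flat pass accumulating the weights.
--     for word, weight in events:
--         corpus[word] += weight
--     return corpus
-- ===== Notes on version B (the rewrite author's own statement) =====
-- stated objective: alternative
-- what changed: A threads one running dict through the nested page/product/word loops, adding the current points at each word occurrence with an in/else branch; B is staged: it first flattens all pages into one chronological list of (word, weight) events, then pre-seeds the result dict with the keys in first-occurrence order via dict.fromkeys, and finally accumulates the weights in one flat unconditional pass over the event list.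
import Mathlib
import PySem

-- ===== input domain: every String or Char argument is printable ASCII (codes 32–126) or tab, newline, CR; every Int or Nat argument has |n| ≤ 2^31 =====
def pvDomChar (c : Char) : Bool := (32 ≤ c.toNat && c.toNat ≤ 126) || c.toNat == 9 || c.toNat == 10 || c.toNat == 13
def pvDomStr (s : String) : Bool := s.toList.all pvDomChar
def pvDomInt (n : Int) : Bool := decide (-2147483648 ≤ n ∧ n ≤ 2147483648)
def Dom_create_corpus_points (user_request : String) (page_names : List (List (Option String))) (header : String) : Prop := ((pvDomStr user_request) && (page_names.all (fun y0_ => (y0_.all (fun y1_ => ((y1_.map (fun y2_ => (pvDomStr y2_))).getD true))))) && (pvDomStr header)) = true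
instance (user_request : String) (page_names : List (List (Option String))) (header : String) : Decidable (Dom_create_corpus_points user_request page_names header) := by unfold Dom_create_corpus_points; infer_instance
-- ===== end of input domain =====

-- B replaces A's running dict threaded through the nested loops by three staged passes:
-- flatten to a (word, weight) event list, pre-seed the keys in first-occurrence order
-- (dict.fromkeys), then accumulate weights in one flat pass (objective: alternative).

-- ===== PORT A =====
-- one product of A's inner loop: lower, split, add `points` per word occurrence
def aProduct (corpus : PySem.Dict String Int) (points : Int) (p : String) : PySem.Dict String Int :=
  let product := PySem.Str.lower p
  let words := PySem.Str.split₀ product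
  words.foldl (fun c word0 =>
    let word := PySem.Str.lower word0
    if c.contains word then
      -- corpus[word] is guarded by `word in corpus`: KeyError impossible, read as getD
      let last_points := c.getD word 0
      let total_points := last_points + points
      c.insert word total_points
    else
      c.insert word points) corpus

def aInner (corpus : PySem.Dict String Int) (names_array : List (Option String)) : PySem.Dict String Int :=
  (names_array.foldl (fun (st : PySem.Dict String Int × Int) product =>
      match product with
      | none => st
      | some p => (aProduct st.1 st.2 p, st.2 - 1))
    (corpus, (names_array.length : Int))).1

def create_corpus_points (user_request : String) (page_names : List (List (Option String))) (header : String) : List (String × Int) :=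
  (page_names.foldl aInner PySem.Dict.empty).items

-- ===== PORT B =====
-- Stage 1: one page's contribution to the chronological (word, weight) event list
def bPage (events : List (String × Int)) (names_array : List (Option String)) : List (String × Int) :=
  (names_array.foldl (fun (st : List (String × Int) × Int) product =>
      match product with
      | none => st
      | some p =>
        let weight := (names_array.length : Int) - st.2
        (st.1 ++ (PySem.Str.split₀ (PySem.Str.lower p)).map (fun word => (word, weight)), st.2 + 1))
    (events, 0)).1

def bEvents (page_names : List (List (Option String))) : List (String × Int) :=
  page_names.foldl bPage []

-- Stage 2: dict.fromkeys((word for word, _ in events), 0) — keys in first-occurrence order, all 0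
def bSeed (events : List (String × Int)) : PySem.Dict String Int :=
  (events.map Prod.fst).foldl (fun d word => d.insert word 0) PySem.Dict.empty

-- Stage 3: corpus[word] += weight over the events; every word was pre-seeded by Stage 2,
-- so the read in Python's read-modify-write never raises and modify (default 0) is exact
def create_corpus_points_alt (user_request : String) (page_names : List (List (Option String))) (header : String) : List (String × Int) :=
  let events := bEvents page_names
  (events.foldl (fun corpus e => corpus.modify e.1 0 (· + e.2)) (bSeed events)).items

-- ===== PRECONDITION & SPEC =====
def Spec_create_corpus_points (user_request : String) (page_names : List (List (Option String))) (header : String) (out : List (String × Int)) : Prop := out = create_corpus_points_alt user_request page_names header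
instance (user_request : String) (page_names : List (List (Option String))) (header : String) (out : List (String × Int)) : Decidable (Spec_create_corpus_points user_request page_names header out) := by unfold Spec_create_corpus_points; infer_instance

-- ===== CLAIM (what is proved, stated in full; the proofs are below) =====
def Claim_equal_create_corpus_points : Prop := ∀ (user_request : String) (page_names : List (List (Option String))) (header : String), Dom_create_corpus_points user_request page_names header → Spec_create_corpus_points user_request page_names header (create_corpus_points user_request page_names header)

-- ===== LEMMAS AND PROOFS =====

-- replaying one (word, weight) event into a dict
def dstep (c : PySem.Dict String Int) (e : String × Int) : PySem.Dict String Int :=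
  c.insert e.1 (c.getD e.1 0 + e.2)

-- the event list of one page, with the starting points value as parameter
def evA : List (Option String) → Int → List (String × Int)
  | [], _ => []
  | none :: t, pt => evA t pt
  | some p :: t, pt =>
      (PySem.Str.split₀ (PySem.Str.lower p)).map (fun w => (w, pt)) ++ evA t (pt - 1)

def pagesEv : List (List (Option String)) → List (String × Int)
  | [] => []
  | na :: t => evA na (na.length : Int) ++ pagesEv t

-- lowerChar is idempotent
lemma lowerChar_idem (c : Char) : PySem.Chars.lowerChar (PySem.Chars.lowerChar c) = PySem.Chars.lowerChar c := by
  have hle : ∀ a b : Char, a ≤ b ↔ a.toNat ≤ b.toNat := by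
    intro a b; rw [Char.le_def, UInt32.le_iff_toNat_le]; rfl
  simp only [PySem.Chars.lowerChar, PySem.Chars.isupper]
  by_cases h1 : ('A' ≤ c)
  · by_cases h2 : (c ≤ 'Z')
    · simp only [h1, h2, decide_true, Bool.and_self, if_true]
      have hA : 65 ≤ c.toNat := (hle 'A' c).mp h1
      have hZ : c.toNat ≤ 90 := (hle c 'Z').mp h2
      have ht : (Char.ofNat (c.toNat + 32)).toNat = c.toNat + 32 := by
        rw [Char.toNat_ofNat, if_pos]; exact Or.inl (by omega)
      have h3 : ¬ ((Char.ofNat (c.toNat + 32)) ≤ 'Z') := by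
        rw [hle]
        show ¬ ((Char.ofNat (c.toNat + 32)).toNat ≤ (90:Nat))
        omega
      simp [h3]
    · simp [h1, h2]
  · simp [h1]

-- every character of every word produced by split₀.go comes from cs, cur or acc
lemma split₀_go_chars (P : Char → Prop) :
    ∀ (cs cur : List Char) (acc : List (List Char)),
      (∀ c ∈ cs, P c) → (∀ c ∈ cur, P c) → (∀ a ∈ acc, ∀ c ∈ a, P c) →
      ∀ w ∈ PySem.Chars.split₀.go cs cur acc, ∀ c ∈ w, P c := by
  intro cs
  induction cs with
  | nil =>
    intro cur acc _ hcur hacc w hw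
    rw [PySem.Chars.split₀.go.eq_def] at hw
    simp only at hw
    split_ifs at hw with hemp
    · exact hacc w (List.mem_reverse.mp hw)
    · rcases List.mem_cons.mp (List.mem_reverse.mp hw) with h | h
      · subst h; intro c hc; exact hcur c (List.mem_reverse.mp hc)
      · exact hacc w h
  | cons ch rest ih =>
    intro cur acc hcs hcur hacc w hw
    rw [PySem.Chars.split₀.go.eq_def] at hw
    simp only at hw
    split_ifs at hw with hsp hemp
    · exact ih [] acc (fun c hc => hcs c (List.mem_cons_of_mem _ hc)) (by simp) hacc w hw
    · refine ih [] (cur.reverse :: acc) (fun c hc => hcs c (List.mem_cons_of_mem _ hc)) (by simp) ?_ w hw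
      intro a ha
      rcases List.mem_cons.mp ha with h | h
      · subst h; intro c hc; exact hcur c (List.mem_reverse.mp hc)
      · exact hacc a h
    · refine ih (ch :: cur) acc (fun c hc => hcs c (List.mem_cons_of_mem _ hc)) ?_ hacc w hw
      intro c hc
      rcases List.mem_cons.mp hc with h | h
      · subst h; exact hcs _ (List.mem_cons.mpr (Or.inl rfl))
      · exact hcur c h

-- each word of split₀ (lower cs) is fixed by lower
lemma chars_words_lower (cs : List Char) :
    ∀ w ∈ PySem.Chars.split₀ (PySem.Chars.lower cs), PySem.Chars.lower w = w := by
  intro w hw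
  have hall : ∀ c ∈ w, PySem.Chars.lowerChar c = c := by
    refine split₀_go_chars (fun c => PySem.Chars.lowerChar c = c)
      (PySem.Chars.lower cs) [] [] ?_ (by simp) (by simp) w hw
    intro c hc
    simp only [PySem.Chars.lower, List.mem_map] at hc
    obtain ⟨c', _, rfl⟩ := hc
    exact lowerChar_idem c'
  show w.map PySem.Chars.lowerChar = w
  exact (List.map_congr_left hall).trans (List.map_id w)

-- the String version
lemma str_words_lower (s : String) :
    ∀ w ∈ PySem.Str.split₀ (PySem.Str.lower s), PySem.Str.lower w = w := by
  intro w hw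
  have hsp : PySem.Str.split₀ (PySem.Str.lower s)
      = (PySem.Chars.split₀ (PySem.Chars.lower s.toList)).map String.ofList := by
    simp [PySem.Str.split₀, PySem.Str.toList_lower]
  rw [hsp, List.mem_map] at hw
  obtain ⟨l, hl, rfl⟩ := hw
  have h2 := chars_words_lower s.toList l hl
  apply String.toList_inj.mp
  rw [PySem.Str.toList_lower, String.toList_ofList]
  exact h2

-- A's per-product loop is the event replay of that product's word events
lemma aProduct_ev (d : PySem.Dict String Int) (pt : Int) (p : String) :
    aProduct d pt p
      = ((PySem.Str.split₀ (PySem.Str.lower p)).map (fun w => (w, pt))).foldl dstep d := by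
  unfold aProduct
  rw [List.foldl_map]
  apply PySem.List.foldl_congr_mem
  intro c w hw
  have hl := str_words_lower p w hw
  simp only [hl, dstep]
  by_cases hc : c.contains w
  · simp [hc]
  · have h0 : c.getD w 0 = 0 :=
      PySem.Dict.getD_of_not_contains c 0 (by simpa using hc)
    simp [hc, h0]

-- A's inner loop replays the page's event list
lemma aInner_fold (l : List (Option String)) :
    ∀ (d : PySem.Dict String Int) (pt : Int),
      (l.foldl (fun (st : PySem.Dict String Int × Int) product =>
          match product with
          | none => st
          | some p => (aProduct st.1 st.2 p, st.2 - 1)) (d, pt)).1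
        = (evA l pt).foldl dstep d := by
  induction l with
  | nil => intro d pt; rfl
  | cons o t ih =>
    intro d pt
    cases o with
    | none => simpa [evA] using ih d pt
    | some p =>
      simp only [List.foldl_cons, evA, List.foldl_append]
      rw [← aProduct_ev d pt p]
      exact ih (aProduct d pt p) (pt - 1)

lemma aInner_ev (d : PySem.Dict String Int) (na : List (Option String)) :
    aInner d na = (evA na (na.length : Int)).foldl dstep d :=
  aInner_fold na d (na.length : Int)

-- A's outer loop replays the concatenation of all pages' events
lemma aOuter_ev (pn : List (List (Option String))) :
    ∀ (d : PySem.Dict String Int),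
      pn.foldl aInner d = (pagesEv pn).foldl dstep d := by
  induction pn with
  | nil => intro d; rfl
  | cons na t ih =>
    intro d
    simp only [List.foldl_cons, pagesEv, List.foldl_append]
    rw [aInner_ev]
    exact ih _

-- B's inner loop builds exactly that page's event list (weight n - scored = points)
lemma bPage_fold (n : Int) (l : List (Option String)) :
    ∀ (ev : List (String × Int)) (s : Int),
      (l.foldl (fun (st : List (String × Int) × Int) product =>
          match product with
          | none => st
          | some p =>
            let weight := n - st.2
            (st.1 ++ (PySem.Str.split₀ (PySem.Str.lower p)).map (fun word => (word, weight)), st.2 + 1))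
        (ev, s)).1
      = ev ++ evA l (n - s) := by
  induction l with
  | nil => intro ev s; simp [evA]
  | cons o t ih =>
    intro ev s
    cases o with
    | none => simpa [evA] using ih ev s
    | some p =>
      simp only [List.foldl_cons, evA]
      have hs : n - (s + 1) = n - s - 1 := by ring
      rw [ih, hs, List.append_assoc]

lemma bPage_ev (ev : List (String × Int)) (na : List (Option String)) :
    bPage ev na = ev ++ evA na (na.length : Int) := by
  unfold bPage
  rw [bPage_fold (na.length : Int) na ev 0, sub_zero]

lemma bEvents_fold (pn : List (List (Option String))) :
    ∀ (ev : List (String × Int)), pn.foldl bPage ev = ev ++ pagesEv pn := by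
  induction pn with
  | nil => intro ev; simp [pagesEv]
  | cons na t ih =>
    intro ev
    simp only [List.foldl_cons, pagesEv]
    rw [bPage_ev, ih, List.append_assoc]

lemma bEvents_ev (pn : List (List (Option String))) : bEvents pn = pagesEv pn := by
  unfold bEvents
  rw [bEvents_fold pn [], List.nil_append]

-- getD through an event replay = old value + sum of matching weights
lemma getD_foldl_dstep (es : List (String × Int)) :
    ∀ (d : PySem.Dict String Int) (v : String),
      (es.foldl dstep d).getD v 0
        = d.getD v 0 + ((es.filter (fun e => e.1 == v)).map (·.2)).sum := by
  induction es with
  | nil => intro d v; simp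
  | cons e t ih =>
    intro d v
    simp only [List.foldl_cons, dstep]
    rw [ih, PySem.Dict.getD_insert]
    by_cases hv : v = e.1
    · rw [if_pos hv, List.filter_cons_of_pos (by simp [hv])]
      simp only [List.map_cons, List.sum_cons, hv]
      ring
    · rw [if_neg hv, List.filter_cons_of_neg (by simp [Ne.symm hv])]

-- keys of the event replay = first-occurrence set of the event words
lemma keys_foldl_dstep (es : List (String × Int)) :
    (es.foldl dstep PySem.Dict.empty).keys = PySem.Set.ofList (es.map Prod.fst) := by
  have h := PySem.Dict.keys_foldl_insert_key es Prod.fst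
      (fun (d : PySem.Dict String Int) (e : String × Int) => d.getD e.1 0 + e.2) PySem.Dict.empty
  simpa [dstep, PySem.Dict.keys_empty, PySem.Set.update_nil_left] using h

lemma nodup_keys_foldl_dstep (es : List (String × Int)) :
    (es.foldl dstep PySem.Dict.empty).keys.Nodup :=
  PySem.Dict.nodup_keys_foldl_insert_key es Prod.fst
    (fun d e => d.getD e.1 0 + e.2) PySem.Dict.empty PySem.Dict.nodup_keys_empty

-- B's seed dict: every lookup is 0
lemma seed_getD_aux (l : List String) :
    ∀ (d : PySem.Dict String Int) (v : String), d.getD v 0 = 0 →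
      ((l.foldl (fun d word => d.insert word 0) d).getD v 0) = 0 := by
  induction l with
  | nil => intro d v h; exact h
  | cons w t ih =>
    intro d v h
    simp only [List.foldl_cons]
    refine ih _ v ?_
    rw [PySem.Dict.getD_insert]
    by_cases hv : v = w
    · simp [hv]
    · simp [hv, h]

lemma seed_getD (es : List (String × Int)) (v : String) :
    (bSeed es).getD v 0 = 0 :=
  seed_getD_aux (es.map Prod.fst) PySem.Dict.empty v (PySem.Dict.getD_empty v 0)

-- B's seed dict: keys are exactly the event words in first-occurrence order
lemma seed_keys (es : List (String × Int)) :
    (bSeed es).keys = PySem.Set.ofList (es.map Prod.fst) := by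
  unfold bSeed
  have h := PySem.Dict.keys_foldl_insert (es.map Prod.fst)
      (fun (_ : PySem.Dict String Int) (_ : String) => (0 : Int)) PySem.Dict.empty
  simpa [PySem.Dict.keys_empty, PySem.Set.update_nil_left] using h

lemma seed_nodup (es : List (String × Int)) : (bSeed es).keys.Nodup :=
  PySem.Dict.nodup_keys_foldl_insert (es.map Prod.fst) _ _ PySem.Dict.nodup_keys_empty

-- updating a set with elements it already contains changes nothing
lemma set_update_self (l : List String) :
    PySem.Set.update (PySem.Set.ofList l) l = PySem.Set.ofList l := by
  rw [PySem.Set.update_eq_append_filter]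
  have : (PySem.Set.ofList l).filter (fun y => !(PySem.Set.contains (PySem.Set.ofList l) y)) = [] := by
    rw [List.filter_eq_nil_iff]
    intro y hy
    simpa using (PySem.Set.mem_ofList l y).mp hy
  rw [this, List.append_nil]

-- getD through B's accumulation pass = old value + sum of matching weights
lemma getD_foldl_mstep (es : List (String × Int)) :
    ∀ (d : PySem.Dict String Int) (v : String),
      (es.foldl (fun corpus e => corpus.modify e.1 0 (· + e.2)) d).getD v 0
        = d.getD v 0 + ((es.filter (fun e => e.1 == v)).map (·.2)).sum := by
  induction es with
  | nil => intro d v; simp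
  | cons e t ih =>
    intro d v
    simp only [List.foldl_cons]
    rw [ih, PySem.Dict.getD_modify]
    by_cases hv : v = e.1
    · rw [if_pos hv, List.filter_cons_of_pos (by simp [hv])]
      simp only [List.map_cons, List.sum_cons, hv]
      ring
    · rw [if_neg hv, List.filter_cons_of_neg (by simp [Ne.symm hv])]

-- B's accumulation pass leaves the seeded key list unchanged
lemma keys_foldl_mstep (es : List (String × Int)) :
    (es.foldl (fun corpus e => corpus.modify e.1 0 (· + e.2)) (bSeed es)).keys
      = PySem.Set.ofList (es.map Prod.fst) := by
  have h := PySem.Dict.keys_foldl_modify_key es Prod.fst (0 : Int)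
      (fun (_ : PySem.Dict String Int) (e : String × Int) => (· + e.2)) (bSeed es)
  rw [h, seed_keys, set_update_self]

lemma nodup_keys_foldl_mstep (es : List (String × Int)) :
    (es.foldl (fun corpus e => corpus.modify e.1 0 (· + e.2)) (bSeed es)).keys.Nodup :=
  PySem.Dict.nodup_keys_foldl_modify_key es Prod.fst 0
    (fun _ e => (· + e.2)) (bSeed es) (seed_nodup es)

-- ===== VERDICT (by name: the statement is the Claim_ definition above) =====
theorem create_corpus_points_spec : Claim_equal_create_corpus_points := by
  intro ur pn h _
  unfold Spec_create_corpus_points create_corpus_points create_corpus_points_alt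
  rw [aOuter_ev pn PySem.Dict.empty, bEvents_ev]
  rw [PySem.Dict.items_eq_map_keys _ (nodup_keys_foldl_dstep (pagesEv pn)) 0,
      PySem.Dict.items_eq_map_keys _ (nodup_keys_foldl_mstep (pagesEv pn)) 0,
      keys_foldl_dstep, keys_foldl_mstep]
  apply List.map_congr_left
  intro k _
  rw [getD_foldl_dstep, PySem.Dict.getD_empty, zero_add,
      getD_foldl_mstep, seed_getD, zero_add]
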